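-- pv_equiv track=rewrite | github.com/vermutsk/Laborator | NE_metodi/crypt_lab_21.py | User_key
-- ===== SOURCE A (Python) =====
-- def User_key(X_l, z, r, p, num_users=3):
--     pre = z ** (num_users * r)
--     k = 1
--     for i in range(0, num_users):
--         for j in range(num_users, -1, -1):
--             k = k * (X_l[int((j - i) % num_users)] ** i)
--             break
--     k = pre * k
--     k = k % p
--     return k
-- ===== SOURCE B (Python) =====
-- def User_key(X_l, z, r, p, num_users=3):
--     k = pow(z, num_users * r, p)
--     for x, e in zip(X_l[1:], range(num_users - 1, 0, -1)):
--         k = k * pow(x, e, p) % p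
--     return k
-- ===== Notes on version B (the rewrite author's own statement) =====
-- stated objective: faster
-- what changed: B replaces the huge-integer power z**(num_users*r) followed by one final mod with a three-arg pow(z, num_users*r, p) and then multiplies the remaining factors mod p by zipping the list tail X_l[1:] with a countdown of exponents range(num_users-1, 0, -1), reducing after every factor; A's nested range loop with break, modular index arithmetic and the identity i=0 factor disappear entirely.
-- outside the precondition, e.g. on User_key([2], 1, 5, -1, -3): A returns -0.0, B returns 0
import Mathlib
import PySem

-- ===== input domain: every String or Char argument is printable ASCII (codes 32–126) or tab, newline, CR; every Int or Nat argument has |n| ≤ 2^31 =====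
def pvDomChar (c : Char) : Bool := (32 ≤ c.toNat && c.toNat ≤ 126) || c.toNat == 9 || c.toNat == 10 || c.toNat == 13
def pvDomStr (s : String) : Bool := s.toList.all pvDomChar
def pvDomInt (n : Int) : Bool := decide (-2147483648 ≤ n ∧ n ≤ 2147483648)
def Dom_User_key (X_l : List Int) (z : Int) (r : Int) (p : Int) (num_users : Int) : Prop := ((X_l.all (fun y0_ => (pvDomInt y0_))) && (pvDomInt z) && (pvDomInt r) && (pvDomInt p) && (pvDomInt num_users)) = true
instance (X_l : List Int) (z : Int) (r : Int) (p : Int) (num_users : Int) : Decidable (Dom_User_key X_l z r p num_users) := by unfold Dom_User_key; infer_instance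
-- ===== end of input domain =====

-- B computes the same key with modular exponentiation and a zip of the list tail with a countdown of exponents, reducing mod p per factor; proved equal to A on Pre_ (p ≠ 0, non-negative exponent, X_l long enough).


-- ===== PORT A =====
-- literal port of A: pre = z**(num_users*r); for i in range(num_users): first j of range(num_users,-1,-1) then break; k %= p
def User_key (X_l : List Int) (z : Int) (r : Int) (p : Int) (num_users : Int) : Int :=
  let pre := z ^ (num_users * r).toNat
  let k := (PySem.List.pyRange 0 num_users 1).foldl
    (fun k i =>
      match PySem.List.pyRange num_users (-1) (-1) with
      | [] => k
      | j :: _ => k * (PySem.List.pyGetD X_l (PySem.Int.mod (j - i) num_users) 0) ^ i.toNat)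
    1
  let k2 := pre * k
  PySem.Int.mod k2 p

-- ===== PORT B =====
-- literal port of Source B: k = pow(z, num_users*r, p); for x, e in zip(X_l[1:], range(num_users-1, 0, -1)): k = k * pow(x, e, p) % p
def User_key_alt (X_l : List Int) (z : Int) (r : Int) (p : Int) (num_users : Int) : Int :=
  let k0 := PySem.Int.powMod z (num_users * r).toNat p
  (List.zip (PySem.List.slice X_l (some 1) none) (PySem.List.pyRange (num_users - 1) 0 (-1))).foldl
    (fun k xe => PySem.Int.mod (k * PySem.Int.powMod xe.1 xe.2.toNat p) p) k0

-- ===== PRECONDITION & SPEC =====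
-- Pre_ = exactly where Python A returns an int: p ≠ 0 (else ZeroDivisionError), num_users*r ≥ 0 (else the power is a
-- float, not an int), and X_l long enough for the indices A reads (else IndexError).
def Pre_User_key (X_l : List Int) (z : Int) (r : Int) (p : Int) (num_users : Int) : Prop :=
  p ≠ 0 ∧ 0 ≤ num_users * r ∧ (1 ≤ num_users → num_users ≤ (X_l.length : Int))
instance (X_l : List Int) (z : Int) (r : Int) (p : Int) (num_users : Int) : Decidable (Pre_User_key X_l z r p num_users) := by unfold Pre_User_key; infer_instance
def pvWitness_User_key : List Int × Int × Int × Int × Int := ([2, 3, 5], 7, 2, 11, 3)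

def Spec_User_key (X_l : List Int) (z : Int) (r : Int) (p : Int) (num_users : Int) (out : Int) : Prop := out = User_key_alt X_l z r p num_users
instance (X_l : List Int) (z : Int) (r : Int) (p : Int) (num_users : Int) (out : Int) : Decidable (Spec_User_key X_l z r p num_users out) := by unfold Spec_User_key; infer_instance

-- ===== CLAIM (what is proved, stated in full; the proofs are below) =====
def Claim_equal_User_key : Prop := ∀ (X_l : List Int) (z : Int) (r : Int) (p : Int) (num_users : Int), Dom_User_key X_l z r p num_users → Pre_User_key X_l z r p num_users → Spec_User_key X_l z r p num_users (User_key X_l z r p num_users)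

-- ===== LEMMAS AND PROOFS =====

-- interleaved floor-mod fold = one final floor-mod of the plain product fold
lemma foldl_mod_eq {α : Type} (f : α → Int) (L : List α) (p : Int) :
    ∀ a : Int, L.foldl (fun k x => PySem.Int.mod (k * PySem.Int.mod (f x) p) p) (PySem.Int.mod a p)
      = PySem.Int.mod (L.foldl (fun k x => k * f x) a) p := by
  induction L with
  | nil => intro a; rfl
  | cons x t ih =>
      intro a
      simp only [List.foldl_cons]
      have h1 : PySem.Int.mod (PySem.Int.mod a p * PySem.Int.mod (f x) p) p
          = PySem.Int.mod (a * f x) p := by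
        simp only [PySem.Int.mod]
        rw [← Int.mul_fmod]
      rw [h1, ih]

-- a multiplicative fold is the initial accumulator times the product of the mapped list
lemma foldl_mul_eq_prod {α : Type} (f : α → Int) (L : List α) :
    ∀ a : Int, L.foldl (fun k x => k * f x) a = a * (L.map f).prod := by
  induction L with
  | nil => intro a; simp
  | cons x t ih => intro a; simp only [List.foldl_cons, List.map_cons, List.prod_cons, ih (a * f x)]; ring

-- B's factor list (tail zipped with the countdown of exponents) is A's factor list reversed
lemma zip_rev_map (X_l : List Int) (nu : Int) (h1 : 1 ≤ nu) (hlen : nu ≤ (X_l.length : Int)) :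
    (List.zip X_l.tail ((PySem.List.pyRange 1 nu 1).reverse)).map
        (fun xe : Int × Int => xe.1 ^ xe.2.toNat)
      = ((PySem.List.pyRange 1 nu 1).map
          (fun i => PySem.List.pyGetD X_l (nu - i) 0 ^ i.toNat)).reverse := by
  have hm : (PySem.List.pyRange 1 nu 1).length = (nu - 1).toNat := by
    rw [PySem.List.length_pyRange_one]
  apply List.ext_getElem
  · simp only [List.length_map, List.length_zip, List.length_reverse, List.length_tail, hm]
    omega
  · intro j hj1 hj2
    have hjm : j < (nu - 1).toNat := by
      simpa [hm] using hj2
    have hjt : j < X_l.tail.length := by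
      simp only [List.length_tail]; omega
    have hjr : j < (PySem.List.pyRange 1 nu 1).reverse.length := by
      simp only [List.length_reverse, hm]; omega
    simp only [List.getElem_map, List.getElem_zip, List.getElem_reverse, List.length_map, hm]
    rw [List.getElem_tail, PySem.List.getElem_pyRange_one]
    have hidx : nu - (1 + ((nu - 1).toNat - 1 - j : Nat)) = ((j : Int) + 1) := by omega
    rw [hidx, PySem.List.pyGetD_eq_getElem X_l (i := (j : Int) + 1) 0 (by omega) (by omega)]
    have htn : ((j : Int) + 1).toNat = j + 1 := by omega
    simp [htn]

theorem User_key_equal_aux (X_l : List Int) (z r p num_users : Int)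
    (hlen : 1 ≤ num_users → num_users ≤ (X_l.length : Int)) :
    User_key X_l z r p num_users = User_key_alt X_l z r p num_users := by
  unfold User_key User_key_alt
  rw [PySem.List.slice_from_one]
  have hrev : PySem.List.pyRange (num_users - 1) 0 (-1)
      = (PySem.List.pyRange 1 num_users 1).reverse := by
    rw [PySem.List.pyRange_neg_one_eq_reverse]
    norm_num
  rw [hrev]
  simp only [PySem.Int.powMod_eq]
  by_cases h1 : 1 ≤ num_users
  · have hl := hlen h1
    -- A's outer loop: peel off i = 0 (whose factor is x ^ 0 = 1)
    rw [PySem.List.pyRange_one_cons (a := 0) (b := num_users) (by omega)]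
    have hin : PySem.List.pyRange num_users (-1) (-1)
        = num_users :: PySem.List.pyRange (num_users - 1) (-1) (-1) :=
      PySem.List.pyRange_neg_one_cons (by omega)
    simp only [List.foldl_cons, hin, zero_add]
    have h0 : (1 : Int) * (PySem.List.pyGetD X_l (PySem.Int.mod (num_users - 0) num_users) 0) ^ (0 : Int).toNat = 1 := by
      simp
    rw [h0]
    -- drop the redundant % num_users on A's index
    have hA : (PySem.List.pyRange 1 num_users 1).foldl
        (fun k i => k * (PySem.List.pyGetD X_l (PySem.Int.mod (num_users - i) num_users) 0) ^ i.toNat) 1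
        = (PySem.List.pyRange 1 num_users 1).foldl
        (fun k i => k * (PySem.List.pyGetD X_l (num_users - i) 0) ^ i.toNat) 1 := by
      apply PySem.List.foldl_congr_mem
      intro acc x hx
      rw [PySem.List.mem_pyRange_one] at hx
      have : PySem.Int.mod (num_users - x) num_users = num_users - x := by
        simp only [PySem.Int.mod]
        exact Int.fmod_eq_of_lt (by omega) (by omega)
      rw [this]
    rw [hA]
    -- both sides as  (product of the same factors) % p
    rw [foldl_mod_eq (fun xe : Int × Int => xe.1 ^ xe.2.toNat) _ p (z ^ (num_users * r).toNat)]
    rw [foldl_mul_eq_prod, foldl_mul_eq_prod, one_mul,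
        zip_rev_map X_l num_users h1 hl, List.prod_reverse]
  · rw [PySem.List.pyRange_one_eq_nil (a := 0) (b := num_users) (by omega),
        PySem.List.pyRange_one_eq_nil (a := 1) (b := num_users) (by omega)]
    simp

-- ===== VERDICT (by name: the statement is the Claim_ definition above) =====
theorem User_key_spec : Claim_equal_User_key := by
  intro X_l z r p num_users _ hpre
  exact User_key_equal_aux X_l z r p num_users hpre.2.2
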